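-- pv_equiv track=rewrite | github.com/GClaes/projetIA | projetIA/game/business.py | define_winner
-- ===== SOURCE A (Python) =====
-- def count_elements(stats, element):
--     if(stats.get(element,0)==0):
--         stats[element] = 1
--     else:
--         stats.update({element:stats.get(element)+1})
--     return stats
--
-- def define_winner(board):
--     stats = {}
--     for line in board:
--         for cell in line:
--             stats = count_elements(stats, cell)
--     max = -1
--     kmax = -1
--     tie = False
--     for key,element in stats.items():
--         if max < element:
--             kmax = key
--             max = element
--             tie = False
--         elif max == element:
--             tie = True
--     return (kmax, max, tie)
-- ===== SOURCE B (Python) =====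
-- def define_winner(board):
--     flat = [cell for line in board for cell in line]
--     distinct = list(dict.fromkeys(flat))
--     if not distinct:
--         return (-1, -1, False)
--     kmax = max(distinct, key=flat.count)
--     mx = flat.count(kmax)
--     tie = sum(1 for v in distinct if flat.count(v) == mx) > 1
--     return (kmax, mx, tie)
-- ===== Notes on version B (the rewrite author's own statement) =====
-- stated objective: alternative
-- what changed: B builds no frequency dict at all: it flattens the board, deduplicates first occurrences with dict.fromkeys, and selects the winner with max(distinct, key=flat.count) plus list.count for the max value and the tie test, instead of A's incremental counting dict and running-max/tie state machine.
import Mathlib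
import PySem

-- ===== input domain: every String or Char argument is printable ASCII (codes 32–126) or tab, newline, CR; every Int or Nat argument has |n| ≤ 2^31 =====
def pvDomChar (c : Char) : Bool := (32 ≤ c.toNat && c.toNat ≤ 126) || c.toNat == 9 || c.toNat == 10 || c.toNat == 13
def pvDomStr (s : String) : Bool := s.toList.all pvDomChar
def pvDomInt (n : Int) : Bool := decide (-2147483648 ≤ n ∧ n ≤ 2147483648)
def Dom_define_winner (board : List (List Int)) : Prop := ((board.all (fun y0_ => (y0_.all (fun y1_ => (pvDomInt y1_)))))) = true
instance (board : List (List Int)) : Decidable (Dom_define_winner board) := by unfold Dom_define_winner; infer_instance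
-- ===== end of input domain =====

-- B drops A's counting dict and running-max/tie state machine entirely: it flattens the board,
-- deduplicates first occurrences, and picks the winner with max(distinct, key=flat.count); a
-- genuinely different traversal of the data (alternative, not claimed faster).

-- ===== PORT A =====
def count_elements (stats : PySem.Dict Int Int) (element : Int) : PySem.Dict Int Int :=
  if stats.getD element 0 == 0 then
    stats.insert element 1
  else
    -- stats.get(element) is guaranteed present in this branch; getD 0 is a totality default
    stats.insert element ((stats.get? element).getD 0 + 1)

def define_winner (board : List (List Int)) : Int × Int × Bool :=
  let stats := board.foldl (fun s line => line.foldl (fun s cell => count_elements s cell) s) PySem.Dict.empty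
  stats.items.foldl
    (fun (st : Int × Int × Bool) kv =>
      if st.2.1 < kv.2 then (kv.1, kv.2, false)
      else if st.2.1 == kv.2 then (st.1, st.2.1, true)
      else st)
    (-1, -1, false)

-- ===== PORT B =====
def define_winner_alt (board : List (List Int)) : Int × Int × Bool :=
  let flat := board.flatMap (fun line => line)          -- [cell for line in board for cell in line]
  let distinct := PySem.List.dedup flat                  -- list(dict.fromkeys(flat))
  if distinct.isEmpty then (-1, -1, false)
  else
    match PySem.List.max? distinct (fun v => (flat.count v : Int)) with
    | none => (-1, -1, false)   -- unreachable: distinct is nonempty here (totality arm for Python's max)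
    | some kmax =>
      let mx : Int := flat.count kmax
      let tie := decide (1 < (distinct.countP (fun v => (flat.count v : Int) == mx)))
      (kmax, mx, tie)

-- ===== PRECONDITION & SPEC =====
def Spec_define_winner (board : List (List Int)) (out : Int × Int × Bool) : Prop := out = define_winner_alt board
instance (board : List (List Int)) (out : Int × Int × Bool) : Decidable (Spec_define_winner board out) := by unfold Spec_define_winner; infer_instance

-- ===== CLAIM (what is proved, stated in full; the proofs are below) =====
def Claim_equal_define_winner : Prop := ∀ (board : List (List Int)), Dom_define_winner board → Spec_define_winner board (define_winner board)

-- ===== LEMMAS AND PROOFS =====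

theorem count_elements_eq (s : PySem.Dict Int Int) (c : Int) :
    count_elements s c = s.insert c (s.getD c 0 + 1) := by
  unfold count_elements
  rcases h : s.get? c with _ | v
  · simp [PySem.Dict.getD_eq_get?_getD, h]
  · simp only [PySem.Dict.getD_eq_get?_getD, h, Option.getD_some]
    by_cases hv : v = 0 <;> simp [hv]

theorem build_eq (board : List (List Int)) :
    board.foldl (fun s line => line.foldl (fun s cell => count_elements s cell) s) PySem.Dict.empty
      = PySem.Dict.counter board.flatten := by
  rw [← PySem.Dict.foldl_insert_getD_add_one_eq_counter, ← List.foldl_flatten]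
  simp only [count_elements_eq]

-- characterisation of A's scan, by induction from the back
theorem scan_char (l : List (Int × Int)) (hv : ∀ p ∈ l, 0 < p.2) :
    l.foldl
      (fun (st : Int × Int × Bool) kv =>
        if st.2.1 < kv.2 then (kv.1, kv.2, false)
        else if st.2.1 == kv.2 then (st.1, st.2.1, true)
        else st)
      (-1, -1, false)
    = (((l.find? (fun p => p.2 == (l.map Prod.snd).foldl max (-1))).map Prod.fst).getD (-1),
       (l.map Prod.snd).foldl max (-1),
       decide (1 < ((l.map Prod.snd).filter (fun v => v == (l.map Prod.snd).foldl max (-1))).length)) := by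
  induction l using List.reverseRecOn with
  | nil => simp
  | append_singleton t p ih =>
    have hvt : ∀ q ∈ t, 0 < q.2 := fun q hq => hv q (List.mem_append_left _ hq)
    have hp : 0 < p.2 := hv p (List.mem_append_right _ (List.mem_singleton_self p))
    set M := (t.map Prod.snd).foldl max (-1) with hM
    have hMmax : ∀ q ∈ t, q.2 ≤ M :=
      fun q hq => (PySem.List.le_foldl_max (t.map Prod.snd) (-1)).2 q.2 (List.mem_map_of_mem hq)
    have hMnew : ((t ++ [p]).map Prod.snd).foldl max (-1) = max M p.2 := by
      simp [List.foldl_append, hM]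
    rw [List.foldl_append, ih hvt, List.foldl_cons, List.foldl_nil, hMnew]
    rcases lt_trichotomy M p.2 with hlt | heq | hgt
    · -- new strict maximum at p
      have hmax : max M p.2 = p.2 := max_eq_right hlt.le
      have hnone : t.find? (fun q => q.2 == p.2) = none := by
        rw [List.find?_eq_none]
        intro q hq
        have := hMmax q hq
        simp only [beq_iff_eq]
        omega
      have hfil : (t.map Prod.snd).filter (fun v => v == p.2) = [] := by
        rw [List.filter_eq_nil_iff]
        intro v hvmem
        rcases List.mem_map.mp hvmem with ⟨q, hq, rfl⟩
        have := hMmax q hq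
        simp only [beq_iff_eq]
        omega
      simp [hlt, hmax, List.find?_append, hnone, List.filter_append, hfil]
    · -- p ties the maximum
      have hmax : max M p.2 = M := by omega
      have htne : t ≠ [] := by
        rintro rfl
        simp only [List.map_nil, List.foldl_nil, hM] at heq
        omega
      have hMmem : ∃ q ∈ t, q.2 = M := by
        rcases PySem.List.foldl_max_mem (t.map Prod.snd) (-1) with h | h
        · exfalso
          rcases List.exists_mem_of_ne_nil t htne with ⟨q, hq⟩
          have h1 := hMmax q hq
          have h2 := hvt q hq
          rw [← hM] at h
          omega
        · rw [← hM] at h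
          rcases List.mem_map.mp h with ⟨q, hq, hq2⟩
          exact ⟨q, hq, hq2⟩
      have hcnt : 1 ≤ ((t.map Prod.snd).filter (fun v => v == M)).length := by
        rcases hMmem with ⟨q, hq, hq2⟩
        have : q.2 ∈ (t.map Prod.snd).filter (fun v => v == M) :=
          List.mem_filter.mpr ⟨List.mem_map_of_mem hq, by simp [hq2]⟩
        exact List.length_pos_of_mem this
      have hbeq : (M == p.2) = true := beq_iff_eq.mpr heq
      have hnlt : ¬ M < p.2 := by omega
      have hfila : ((t ++ [p]).map Prod.snd).filter (fun v => v == M)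
          = (t.map Prod.snd).filter (fun v => v == M) ++ [p.2] := by
        have hb : (p.2 == M) = true := beq_iff_eq.mpr heq.symm
        simp [List.filter_append, hb]
      rcases hopt : t.find? (fun q => q.2 == M) with _ | q0
      · exfalso
        rcases hMmem with ⟨q, hq, hq2⟩
        have := List.find?_eq_none.mp hopt q hq
        simp [hq2] at this
      · rw [hmax]
        simp only [hnlt, if_false, hbeq, if_true, List.find?_append, hopt, hfila,
          List.length_append, Option.some_or]
        simp only [Prod.mk.injEq]
        refine ⟨trivial, trivial, ?_⟩
        simp only [List.length_cons, List.length_nil]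
        rw [eq_comm, decide_eq_true_iff]
        omega
    · -- p below the maximum
      have hmax : max M p.2 = M := max_eq_left hgt.le
      have hne2 : ¬ (M == p.2) = true := by simp; omega
      have hpfail : ¬ ((fun q : Int × Int => q.2 == M) p) = true := by simp; omega
      simp only [hmax]
      rw [if_neg (by omega), if_neg hne2]
      have hfa : (t ++ [p]).find? (fun q => q.2 == M) = t.find? (fun q => q.2 == M) := by
        rw [List.find?_append]
        rcases h : t.find? (fun q => q.2 == M) with _ | q0
        · simp [hpfail]
        · simp [h]
      have hfila : ((t ++ [p]).map Prod.snd).filter (fun v => v == M)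
          = (t.map Prod.snd).filter (fun v => v == M) := by
        simp only [List.map_append, List.filter_append, List.map_cons, List.map_nil]
        have : ¬ (p.2 == M) = true := by simp; omega
        simp [this]
      rw [hfa, hfila]

-- Python's max(xs, key) is the FIRST element attaining the maximal key: find? at the running max
theorem max?_eq_find (xs : List Int) (key : Int → Int)
    (h : ∀ x ∈ xs, -1 < key x) (hne : xs ≠ []) :
    PySem.List.max? xs key = xs.find? (fun x => key x == (xs.map key).foldl max (-1)) := by
  induction xs using List.reverseRecOn with
  | nil => exact absurd rfl hne
  | append_singleton t p ih =>
    have hp : -1 < key p := h p (List.mem_append_right _ (List.mem_singleton_self p))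
    have ht : ∀ x ∈ t, -1 < key x := fun x hx => h x (List.mem_append_left _ hx)
    have hstep_none : PySem.List.max? t key = none →
        PySem.List.max? (t ++ [p]) key = some p := by
      intro hh
      unfold PySem.List.max? at hh ⊢
      rw [List.foldl_append, List.foldl_cons, List.foldl_nil, hh]
    have hstep_some : ∀ m, PySem.List.max? t key = some m →
        PySem.List.max? (t ++ [p]) key = (if key m < key p then some p else some m) := by
      intro m hh
      unfold PySem.List.max? at hh ⊢
      rw [List.foldl_append, List.foldl_cons, List.foldl_nil, hh]
    set M := (t.map key).foldl max (-1) with hM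
    have hMmax : ∀ x ∈ t, key x ≤ M :=
      fun x hx => (PySem.List.le_foldl_max (t.map key) (-1)).2 (key x) (List.mem_map_of_mem hx)
    have hMnew : ((t ++ [p]).map key).foldl max (-1) = max M (key p) := by
      simp [List.foldl_append, hM]
    rw [hMnew]
    cases htn : t with
    | nil =>
      subst htn
      have hM0 : M = -1 := by rw [hM]; rfl
      have hmx : max M (key p) = key p := by omega
      rw [hstep_none (by rfl)]
      simp [hmx]
    | cons a rest =>
      have htne : t ≠ [] := by rw [htn]; exact List.cons_ne_nil a rest
      rw [← htn]
      have hMmem : ∃ x ∈ t, key x = M := by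
        rcases PySem.List.foldl_max_mem (t.map key) (-1) with hh | hh
        · exfalso
          have h1 := hMmax a (by rw [htn]; exact List.mem_cons_self ..)
          have h2 := ht a (by rw [htn]; exact List.mem_cons_self ..)
          rw [← hM] at hh
          omega
        · rw [← hM] at hh
          rcases List.mem_map.mp hh with ⟨x, hx, hx2⟩
          exact ⟨x, hx, hx2⟩
      rcases hopt : t.find? (fun x => key x == M) with _ | m
      · exfalso
        rcases hMmem with ⟨x, hx, hx2⟩
        have := List.find?_eq_none.mp hopt x hx
        simp [hx2] at this
      · have hmt : PySem.List.max? t key = some m := by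
          rw [ih ht htne]; exact hopt
        have hkm : key m = M := by
          have := List.find?_some hopt
          simpa using this
        rw [hstep_some m hmt]
        by_cases hlt : key m < key p
        · -- p is the new strict maximum
          have hmax : max M (key p) = key p := by omega
          have hnone : t.find? (fun x => key x == key p) = none := by
            rw [List.find?_eq_none]
            intro x hx
            have := hMmax x hx
            simp only [beq_iff_eq]
            omega
          simp [hlt, hmax, List.find?_append, hnone]
        · -- maximum stays in t, first attainer m survives
          have hmax : max M (key p) = M := by omega
          simp [hlt, hmax, List.find?_append, hopt]

theorem main_aux (D : List Int) (cnt : Int → Int) (hpos : ∀ k ∈ D, 0 < cnt k) :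
    ((((D.map (fun k => (k, cnt k))).find? (fun p => p.2 == ((D.map (fun k => (k, cnt k))).map Prod.snd).foldl max (-1))).map Prod.fst).getD (-1),
     ((D.map (fun k => (k, cnt k))).map Prod.snd).foldl max (-1),
     decide (1 < (((D.map (fun k => (k, cnt k))).map Prod.snd).filter (fun v => v == ((D.map (fun k => (k, cnt k))).map Prod.snd).foldl max (-1))).length))
    = (if D.isEmpty then ((-1 : Int), (-1 : Int), false)
       else match PySem.List.max? D cnt with
         | none => (-1, -1, false)
         | some kmax => (kmax, cnt kmax, decide (1 < D.countP (fun v => cnt v == cnt kmax)))) := by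
  have hsnd : (D.map (fun k => (k, cnt k))).map Prod.snd = D.map cnt := by
    rw [List.map_map]
    rfl
  rw [hsnd]
  cases hDe : D.isEmpty with
  | true =>
    have hnil : D = [] := List.isEmpty_iff.mp hDe
    subst hnil
    simp
  | false =>
    have hDne : D ≠ [] := by
      intro h
      rw [h] at hDe
      simp at hDe
    simp only [Bool.false_eq_true, if_false]
    have hcpos : ∀ k ∈ D, -1 < cnt k := by
      intro k hk
      have := hpos k hk
      omega
    rw [max?_eq_find D cnt hcpos hDne]
    set M := (D.map cnt).foldl max (-1) with hMdef
    have hMmem : ∃ x ∈ D, cnt x = M := by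
      rcases PySem.List.foldl_max_mem (D.map cnt) (-1) with hh | hh
      · exfalso
        rcases List.exists_mem_of_ne_nil D hDne with ⟨x, hx⟩
        have h1 : cnt x ≤ M :=
          (PySem.List.le_foldl_max (D.map cnt) (-1)).2 (cnt x) (List.mem_map_of_mem hx)
        have h2 := hpos x hx
        rw [← hMdef] at hh
        omega
      · rw [← hMdef] at hh
        rcases List.mem_map.mp hh with ⟨x, hx, hx2⟩
        exact ⟨x, hx, hx2⟩
    have hfind : (D.map (fun k => (k, cnt k))).find? (fun p => p.2 == M)
        = (D.find? (fun x => cnt x == M)).map (fun k => (k, cnt k)) := by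
      rw [List.find?_map]
      rfl
    rcases hopt : D.find? (fun x => cnt x == M) with _ | kx
    · exfalso
      rcases hMmem with ⟨x, hx, hx2⟩
      have := List.find?_eq_none.mp hopt x hx
      simp [hx2] at this
    · have hkx : cnt kx = M := by
        have := List.find?_some hopt
        simpa using this
      rw [hfind, hopt]
      simp only [Option.map_some, Option.getD_some]
      rw [← hkx, ← List.countP_eq_length_filter, List.countP_map]
      rfl

theorem define_winner_eq (board : List (List Int)) :
    define_winner board = define_winner_alt board := by
  unfold define_winner define_winner_alt
  simp only [build_eq, List.flatMap_id']
  set flat := board.flatten with hflat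
  have hvpos : ∀ p ∈ (PySem.Dict.counter (κ := Int) flat).items, 0 < p.2 := by
    intro p hp
    rw [PySem.Dict.items_counter] at hp
    rcases List.mem_map.mp hp with ⟨k, hk, rfl⟩
    have hk' : k ∈ flat := (PySem.Set.mem_ofList _ _).mp hk
    have : 0 < flat.count k := List.count_pos_iff.mpr hk'
    simp only
    exact_mod_cast this
  rw [scan_char _ hvpos, PySem.Dict.items_counter, PySem.List.dedup_eq_ofList]
  exact main_aux (PySem.Set.ofList flat) (fun k => (flat.count k : Int))
    (fun k hk => by
      show (0 : Int) < (flat.count k : Int)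
      exact_mod_cast List.count_pos_iff.mpr ((PySem.Set.mem_ofList _ _).mp hk))

-- ===== VERDICT (by name: the statement is the Claim_ definition above) =====
theorem define_winner_spec : Claim_equal_define_winner := by
  intro board _
  exact define_winner_eq board
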